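-- pv_equiv track=rewrite | github.com/DavidSpickett/ExpressionCompiler | main.py | get_symbol
-- ===== SOURCE A (Python) =====
-- import string
--
-- def get_symbol(src, idx):
--     is_string = src[idx] == "\""
--     if is_string:
--         delimiters = ["\""]
--         idx += 1
--     else:
--         delimiters = ["(", ")"]
--         delimiters.extend(string.whitespace)
--
--     symbol = ""
--     while idx < len(src) and src[idx] not in delimiters:
--         symbol += src[idx]
--         idx += 1
--
--     if is_string:
--         idx += 1
--         symbol = "'" + symbol
--
--     return symbol, idx
-- ===== SOURCE B (Python) =====
-- import string
--
-- _DELIMS = frozenset("()" + string.whitespace)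
--
--
-- def _scan(src, pred, start):
--     """Index of the first position >= start whose char satisfies pred, else len(src)."""
--     return next((j for j in range(start, len(src)) if pred(src[j])), len(src))
--
--
-- def get_symbol(src, idx):
--     # Locate the token's end, then take a single slice (A accumulates char by char).
--     if src[idx] == '"':
--         end = _scan(src, '"'.__eq__, idx + 1)
--         return "'" + src[idx + 1:end], end + 1
--     end = _scan(src, _DELIMS.__contains__, idx)
--     return src[idx:end], end
-- ===== Notes on version B (the rewrite author's own statement) =====
-- stated objective: faster
-- what changed: B locates the token's end index first (one boundary scan with the delimiters in a frozenset) and then takes a single slice, instead of A's character-by-character scan that concatenates each char onto a growing string.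
-- outside the precondition, e.g. on get_symbol('ab', -2): A returns ('abab', 2), B returns ('ab', 2)
import Mathlib
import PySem

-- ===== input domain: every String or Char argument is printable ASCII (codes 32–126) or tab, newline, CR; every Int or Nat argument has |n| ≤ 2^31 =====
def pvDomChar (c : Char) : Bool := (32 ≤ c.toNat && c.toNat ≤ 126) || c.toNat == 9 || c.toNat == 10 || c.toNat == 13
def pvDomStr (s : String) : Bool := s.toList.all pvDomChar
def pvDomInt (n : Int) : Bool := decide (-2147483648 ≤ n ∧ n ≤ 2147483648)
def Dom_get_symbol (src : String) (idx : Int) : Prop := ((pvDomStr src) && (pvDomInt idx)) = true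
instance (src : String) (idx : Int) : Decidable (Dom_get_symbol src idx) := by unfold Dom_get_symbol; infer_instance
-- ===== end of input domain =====

-- B finds the token's end index first, then takes one slice (measured faster than A's char-by-char
-- concatenation); equivalence is claimed for in-range non-negative idx (A's natural domain).

-- ===== PORT A =====
-- while idx < len(src) and src[idx] not in delimiters: symbol += src[idx]; idx += 1
def get_symbol_loopA (cs : List Char) (delims : List Char) : Nat → Int → List Char → List Char × Int
  | 0, idx, symbol => (symbol, idx)
  | fuel+1, idx, symbol =>
    if idx < (cs.length : Int) then
      if PySem.List.pyGetD cs idx ' ' ∈ delims then (symbol, idx)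
      else get_symbol_loopA cs delims fuel (idx + 1) (symbol ++ [PySem.List.pyGetD cs idx ' '])
    else (symbol, idx)

def get_symbol (src : String) (idx : Int) : String × Int :=
  let cs := src.toList
  let is_string := PySem.List.pyGetD cs idx ' ' == '"'
  -- string.whitespace = " \t\n\r\x0b\x0c"
  let delims : List Char := if is_string then ['"'] else ['(', ')'] ++ [' ', '\t', '\n', '\r', '\x0b', '\x0c']
  let idx1 : Int := if is_string then idx + 1 else idx
  let r := get_symbol_loopA cs delims (cs.length + 1) idx1 []
  if is_string then (String.ofList ('\'' :: r.1), r.2 + 1) else (String.ofList r.1, r.2)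

-- ===== PORT B =====
def bDelims : List Char := PySem.Set.ofList ['(', ')', ' ', '\t', '\n', '\r', '\x0b', '\x0c']

-- next((j for j in range(start, len(src)) if pred(src[j])), len(src))
def pyFindFirst (cs : List Char) (p : Char → Bool) (start : Int) : Int :=
  match (PySem.List.pyRange start (cs.length : Int) 1).find? (fun j => p (PySem.List.pyGetD cs j ' ')) with
  | some j => j
  | none => (cs.length : Int)

def get_symbol_alt (src : String) (idx : Int) : String × Int :=
  let cs := src.toList
  if PySem.List.pyGetD cs idx ' ' == '"' then
    let e := pyFindFirst cs (fun c => c == '"') (idx + 1)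
    (String.ofList ('\'' :: PySem.List.slice cs (some (idx + 1)) (some e)), e + 1)
  else
    let e := pyFindFirst cs (fun c => decide (c ∈ bDelims)) idx
    (String.ofList (PySem.List.slice cs (some idx) (some e)), e)

-- ===== PRECONDITION & SPEC =====
-- Pre_ excludes idx out of Python range (A raises IndexError) and negative in-range idx,
-- which is outside the tokenizer's natural domain: A's value there is a negative-index
-- wraparound artefact (it scans wrapped tail chars and then re-scans from the front).
def Pre_get_symbol (src : String) (idx : Int) : Prop := 0 ≤ idx ∧ idx < (src.toList.length : Int)
instance (src : String) (idx : Int) : Decidable (Pre_get_symbol src idx) := by unfold Pre_get_symbol; infer_instance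

def pvWitness_get_symbol : String × Int := ("(ab c)", 1)

def Spec_get_symbol (src : String) (idx : Int) (out : String × Int) : Prop := out = get_symbol_alt src idx
instance (src : String) (idx : Int) (out : String × Int) : Decidable (Spec_get_symbol src idx out) := by unfold Spec_get_symbol; infer_instance

-- ===== CLAIM (what is proved, stated in full; the proofs are below) =====
def Claim_equal_get_symbol : Prop := ∀ (src : String) (idx : Int), Dom_get_symbol src idx → Pre_get_symbol src idx → Spec_get_symbol src idx (get_symbol src idx)

-- ===== LEMMAS AND PROOFS =====

theorem pyFindFirst_spec (cs : List Char) (p : Char → Bool) :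
    ∀ (m k : Nat), cs.length - k = m → k ≤ cs.length →
      pyFindFirst cs p (k : Int) =
        (k : Int) + (((cs.drop k).takeWhile (fun c => ! p c)).length : Int) := by
  intro m
  induction m with
  | zero =>
    intro k hm hk
    have hke : k = cs.length := by omega
    subst hke
    simp [pyFindFirst, PySem.List.pyRange_one_eq_nil (le_refl _), List.drop_length]
  | succ m ih =>
    intro k hm hk
    have hlt : k < cs.length := by omega
    have hget : PySem.List.pyGetD cs (k : Int) ' ' = cs[k] := by
      simp [PySem.List.pyGetD_natCast, List.getD_eq_getElem?_getD, hlt]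
    have hdrop : cs.drop k = cs[k] :: cs.drop (k + 1) := by
      exact (List.getElem_cons_drop (i := k) (h := hlt)).symm
    unfold pyFindFirst
    rw [PySem.List.pyRange_one_cons (by exact_mod_cast hlt), List.find?_cons]
    by_cases hp : p cs[k]
    · rw [hget]
      simp only [hp]
      rw [hdrop, List.takeWhile_cons_of_neg (by simp [hp])]
      simp
    · have hcast : (k : Int) + 1 = ((k + 1 : Nat) : Int) := by push_cast; ring
      rw [hget]
      simp only [hp]
      rw [hcast]
      have hih := ih (k + 1) (by omega) (by omega)
      unfold pyFindFirst at hih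
      have hpf : p cs[k] = false := by simpa using hp
      rw [hih, hdrop, List.takeWhile_cons_of_pos (by simp [hpf])]
      simp only [List.length_cons]
      push_cast; ring
  
theorem loopA_spec (cs delims : List Char) :
    ∀ (fuel k : Nat) (acc : List Char), cs.length ≤ k + fuel →
      get_symbol_loopA cs delims fuel (k : Int) acc =
        (acc ++ (cs.drop k).takeWhile (fun c => ! decide (c ∈ delims)),
         (k : Int) + (((cs.drop k).takeWhile (fun c => ! decide (c ∈ delims))).length : Int)) := by
  intro fuel
  induction fuel with
  | zero =>
    intro k acc hk
    have hdrop : cs.drop k = [] := List.drop_eq_nil_of_le (by omega)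
    rw [hdrop]
    simp [get_symbol_loopA]
  | succ fuel ih =>
    intro k acc hk
    by_cases hlt : k < cs.length
    · have hget : PySem.List.pyGetD cs (k : Int) ' ' = cs[k] := by
        simp [PySem.List.pyGetD_natCast, List.getD_eq_getElem?_getD, hlt]
      have hdrop : cs.drop k = cs[k] :: cs.drop (k + 1) := by
        exact (List.getElem_cons_drop (i := k) (h := hlt)).symm
      unfold get_symbol_loopA
      rw [if_pos (by exact_mod_cast hlt), hget]
      by_cases hmem : cs[k] ∈ delims
      · rw [if_pos hmem, hdrop]
        simp [hmem]
      · rw [if_neg hmem]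
        have hcast : (k : Int) + 1 = ((k + 1 : Nat) : Int) := by push_cast; ring
        rw [hcast, ih (k + 1) (acc ++ [cs[k]]) (by omega), hdrop]
        rw [List.takeWhile_cons_of_pos (by simp [hmem])]
        simp only [List.append_assoc, List.singleton_append, List.length_cons, Prod.mk.injEq]
        exact ⟨trivial, by push_cast; ring⟩
    · unfold get_symbol_loopA
      rw [if_neg (by exact_mod_cast hlt)]
      rw [List.drop_eq_nil_of_le (by omega : cs.length ≤ k)]
      simp

theorem take_len_takeWhile {α : Type} (p : α → Bool) (l : List α) :
    l.take (l.takeWhile p).length = l.takeWhile p :=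
  (List.prefix_iff_eq_take.mp (List.takeWhile_prefix p)).symm

-- ===== VERDICT (by name: the statement is the Claim_ definition above) =====
theorem get_symbol_spec : Claim_equal_get_symbol := by
  intro src idx _ hpre
  obtain ⟨h0, hlen⟩ := hpre
  unfold Spec_get_symbol
  lift idx to ℕ using h0 with k
  have hk : k < src.toList.length := by exact_mod_cast hlen
  set cs := src.toList with hcs
  have hget : PySem.List.pyGetD cs (k : Int) ' ' = cs[k] := by
    simp [PySem.List.pyGetD_natCast, List.getD_eq_getElem?_getD, hk]
  by_cases hq : cs[k] = '"'
  · -- string branch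
    have hcast : (k : Int) + 1 = ((k + 1 : Nat) : Int) := by push_cast; ring
    have hpred : (fun c => ! decide (c ∈ (['"'] : List Char))) = (fun c => ! (c == '"')) := by
      funext c; by_cases h : c = '"' <;> simp [h]
    have hfind := pyFindFirst_spec cs (fun c => c == '"') (cs.length - (k+1)) (k+1) rfl (by omega)
    have hloop := loopA_spec cs ['"'] (cs.length + 1) (k + 1) [] (by omega)
    simp only [get_symbol, get_symbol_alt, ← hcs, hget, hq, beq_self_eq_true, if_true, hcast,
      hloop, hfind, hpred, List.nil_append]
    rw [PySem.List.slice_natCast_add]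
    rw [take_len_takeWhile]
  · -- symbol branch
    have hbd : bDelims = ['(', ')', ' ', '\t', '\n', '\r', '\x0b', '\x0c'] := by decide
    have hpred : (fun c => ! decide (c ∈ (['(', ')'] ++ [' ', '\t', '\n', '\r', '\x0b', '\x0c'] : List Char)))
        = (fun c => ! decide (c ∈ bDelims)) := by
      funext c; rw [hbd]; simp
    have hfind := pyFindFirst_spec cs (fun c => decide (c ∈ bDelims)) (cs.length - k) k rfl (by omega)
    have hloop := loopA_spec cs (['(', ')'] ++ [' ', '\t', '\n', '\r', '\x0b', '\x0c']) (cs.length + 1) k [] (by omega)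
    have hq' : (cs[k] == '"') = false := by simp [hq]
    simp only [get_symbol, get_symbol_alt, ← hcs, hget, hq', if_false, Bool.false_eq_true,
      hloop, hfind, hpred, List.nil_append]
    rw [PySem.List.slice_natCast_add]
    rw [take_len_takeWhile]
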